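-- pv_equiv track=rewrite | github.com/bruin-data/ingestr | myenv/lib/python3.11/site-packages/snowflake/connector/auth/webbrowser.py | _check_post_requested
-- ===== SOURCE A (Python) =====
-- def _check_post_requested(data: list[str]) -> tuple[str | None, str | None]:
--     request_line = None
--     header_line = None
--     origin_line = None
--     for line in data:
--         if line.startswith("Access-Control-Request-Method:"):
--             request_line = line
--         elif line.startswith("Access-Control-Request-Headers:"):
--             header_line = line
--         elif line.startswith("Origin:"):
--             origin_line = line
--
--     if (
--         not request_line
--         or not header_line
--         or not origin_line
--         or request_line.split(":")[1].strip() != "POST"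
--     ):
--         return None, None
--
--     return (
--         header_line.split(":")[1].strip(),
--         ":".join(origin_line.split(":")[1:]).strip(),
--     )
-- ===== SOURCE B (Python) =====
-- def _last_with_prefix(data, prefix):
--     for line in reversed(data):
--         if line.startswith(prefix):
--             return line
--     return None
--
--
-- def _check_post_requested(data):
--     request = _last_with_prefix(data, "Access-Control-Request-Method:")
--     header = _last_with_prefix(data, "Access-Control-Request-Headers:")
--     origin = _last_with_prefix(data, "Origin:")
--     if request is None or header is None or origin is None:
--         return None, None
--     if request.split(":")[1].strip() != "POST":
--         return None, None
--     return header.split(":")[1].strip(), ":".join(origin.split(":")[1:]).strip()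
-- ===== Notes on version B (the rewrite author's own statement) =====
-- stated objective: simpler
-- what changed: Replaces the single forward pass with a three-variable elif state machine by three independent backward scans that early-return the last matching line per header, separating the search from the guard/extraction.
import Mathlib
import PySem

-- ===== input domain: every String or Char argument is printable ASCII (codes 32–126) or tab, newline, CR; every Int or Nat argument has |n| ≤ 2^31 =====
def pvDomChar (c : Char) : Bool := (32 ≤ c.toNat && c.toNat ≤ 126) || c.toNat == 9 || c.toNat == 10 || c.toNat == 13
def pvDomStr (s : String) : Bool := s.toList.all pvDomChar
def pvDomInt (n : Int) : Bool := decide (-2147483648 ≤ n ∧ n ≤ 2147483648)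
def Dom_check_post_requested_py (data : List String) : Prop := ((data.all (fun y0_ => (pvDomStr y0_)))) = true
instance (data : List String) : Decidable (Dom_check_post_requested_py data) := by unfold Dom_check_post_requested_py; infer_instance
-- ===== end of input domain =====

-- B replaces A's single forward pass with an elif-chained three-variable state machine by three
-- independent backward scans that early-return the last matching line per header (objective: simpler).

-- ===== PORT A =====
-- the loop body of A's for-loop (elif chain updating the three state variables)
def pvStepA (s : Option String × Option String × Option String) (line : String) :
    Option String × Option String × Option String :=
  if PySem.Str.startswith line "Access-Control-Request-Method:" then (some line, s.2.1, s.2.2)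
  else if PySem.Str.startswith line "Access-Control-Request-Headers:" then (s.1, some line, s.2.2)
  else if PySem.Str.startswith line "Origin:" then (s.1, s.2.1, some line)
  else s

-- Python's 'not x' on an Optional[str]: true for None and for ""
def pvFalsy (o : Option String) : Bool :=
  match o with
  | none => true
  | some s => s == ""

-- '.split(":")[1]' is ported with defaults on the none branches: ':' ≠ '' so split? is always
-- some, and the [1] index exists whenever the guard lets execution reach it (the line contains ':').
def check_post_requested_py (data : List String) : Option String × Option String :=
  let st := data.foldl pvStepA (none, none, none)
  if pvFalsy st.1 || pvFalsy st.2.1 || pvFalsy st.2.2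
      || (PySem.Str.strip (PySem.List.pyGetD ((PySem.Str.split? (st.1.getD "") ":").getD []) 1 "") != "POST")
  then (none, none)
  else (PySem.Str.strip (PySem.List.pyGetD ((PySem.Str.split? (st.2.1.getD "") ":").getD []) 1 ""),
        PySem.Str.strip (PySem.Str.join ":" (((PySem.Str.split? (st.2.2.getD "") ":").getD []).drop 1)))

-- ===== PORT B =====
-- 'for line in reversed(data): if line.startswith(prefix): return line' = first match in the reverse
def pvLastWithPrefix (data : List String) (pre : String) : Option String :=
  data.reverse.find? (fun line => PySem.Str.startswith line pre)

def check_post_requested_py_alt (data : List String) : Option String × Option String :=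
  match pvLastWithPrefix data "Access-Control-Request-Method:",
        pvLastWithPrefix data "Access-Control-Request-Headers:",
        pvLastWithPrefix data "Origin:" with
  | some request, some header, some origin =>
      if PySem.Str.strip (PySem.List.pyGetD ((PySem.Str.split? request ":").getD []) 1 "") != "POST"
      then (none, none)
      else (PySem.Str.strip (PySem.List.pyGetD ((PySem.Str.split? header ":").getD []) 1 ""),
            PySem.Str.strip (PySem.Str.join ":" (((PySem.Str.split? origin ":").getD []).drop 1)))
  | _, _, _ => (none, none)

-- ===== PRECONDITION & SPEC =====
def Spec_check_post_requested_py (data : List String) (out : Option String × Option String) : Prop := out = check_post_requested_py_alt data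
instance (data : List String) (out : Option String × Option String) : Decidable (Spec_check_post_requested_py data out) := by unfold Spec_check_post_requested_py; infer_instance

-- ===== CLAIM (what is proved, stated in full; the proofs are below) =====
def Claim_equal_check_post_requested_py : Prop := ∀ (data : List String), Dom_check_post_requested_py data → Spec_check_post_requested_py data (check_post_requested_py data)

-- ===== LEMMAS AND PROOFS =====

-- a last-match fold is the first match of the reverse
theorem pv_fold_lastmatch (p : String → Bool) (xs : List String) (init : Option String) :
    xs.foldl (fun r x => if p x then some x else r) init = (xs.reverse.find? p).or init := by
  induction xs generalizing init with
  | nil => simp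
  | cons x xs ih =>
      simp only [List.foldl_cons, List.reverse_cons, List.find?_append, ih, Option.or_assoc]
      congr 1
      cases h : p x <;> simp [List.find?, h]

-- two strings with incomparable prefixes: startswith one excludes startswith the other
theorem pv_startswith_excl {a b : String} (hab : ¬ (a.toList <+: b.toList))
    (hba : ¬ (b.toList <+: a.toList)) (s : String)
    (h : PySem.Str.startswith s a = true) : PySem.Str.startswith s b = false := by
  by_contra hb
  rw [Bool.not_eq_false] at hb
  rw [PySem.Str.startswith_eq, PySem.Chars.startswith_iff] at h hb
  rcases List.prefix_or_prefix_of_prefix h hb with h' | h'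
  · exact hab h'
  · exact hba h'

-- A's triple fold, componentwise
theorem pv_fold_triple (xs : List String) (init : Option String × Option String × Option String) :
    xs.foldl pvStepA init =
      (xs.foldl (fun r x => if PySem.Str.startswith x "Access-Control-Request-Method:" then some x else r) init.1,
       xs.foldl (fun r x => if (!PySem.Str.startswith x "Access-Control-Request-Method:"
                              && PySem.Str.startswith x "Access-Control-Request-Headers:") then some x else r) init.2.1,
       xs.foldl (fun r x => if (!PySem.Str.startswith x "Access-Control-Request-Method:"
                              && !PySem.Str.startswith x "Access-Control-Request-Headers:"
                              && PySem.Str.startswith x "Origin:") then some x else r) init.2.2) := by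
  induction xs generalizing init with
  | nil => simp
  | cons x xs ih =>
      simp only [List.foldl_cons, ih]
      have hst : pvStepA init x =
          (if PySem.Str.startswith x "Access-Control-Request-Method:" then some x else init.1,
           if (!PySem.Str.startswith x "Access-Control-Request-Method:"
               && PySem.Str.startswith x "Access-Control-Request-Headers:") then some x else init.2.1,
           if (!PySem.Str.startswith x "Access-Control-Request-Method:"
               && !PySem.Str.startswith x "Access-Control-Request-Headers:"
               && PySem.Str.startswith x "Origin:") then some x else init.2.2) := by
        cases h1 : PySem.Str.startswith x "Access-Control-Request-Method:" <;>
          cases h2 : PySem.Str.startswith x "Access-Control-Request-Headers:" <;>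
            cases h3 : PySem.Str.startswith x "Origin:" <;>
              simp only [pvStepA, h1, h2, h3, Bool.not_true, Bool.not_false, Bool.and_true,
                Bool.and_false, if_true, if_false, Bool.false_eq_true]
      rw [hst]

theorem pv_excl_12 (s : String) (h : PySem.Str.startswith s "Access-Control-Request-Headers:" = true) :
    PySem.Str.startswith s "Access-Control-Request-Method:" = false :=
  pv_startswith_excl (by decide) (by decide) s h

theorem pv_excl_13 (s : String) (h : PySem.Str.startswith s "Origin:" = true) :
    PySem.Str.startswith s "Access-Control-Request-Method:" = false :=
  pv_startswith_excl (by decide) (by decide) s h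

theorem pv_excl_23 (s : String) (h : PySem.Str.startswith s "Origin:" = true) :
    PySem.Str.startswith s "Access-Control-Request-Headers:" = false :=
  pv_startswith_excl (by decide) (by decide) s h

-- a line matched by a nonempty prefix is not the empty string
theorem pv_match_ne_empty {pre s : String} (hpre : pre ≠ "")
    (h : PySem.Str.startswith s pre = true) : (s == "") = false := by
  rcases eq_or_ne s "" with rfl | hs
  · rw [PySem.Str.startswith_eq, PySem.Chars.startswith_iff] at h
    have : pre = "" := by simpa using h
    exact absurd this hpre
  · simp [hs]

-- ===== VERDICT (by name: the statement is the Claim_ definition above) =====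
theorem check_post_requested_py_spec : Claim_equal_check_post_requested_py := by
  intro data _
  unfold Spec_check_post_requested_py check_post_requested_py check_post_requested_py_alt pvLastWithPrefix
  rw [pv_fold_triple]
  have e2 : (fun x => (!PySem.Str.startswith x "Access-Control-Request-Method:"
      && PySem.Str.startswith x "Access-Control-Request-Headers:"))
      = (fun x => PySem.Str.startswith x "Access-Control-Request-Headers:") := by
    funext x
    cases h : PySem.Str.startswith x "Access-Control-Request-Headers:"
    · simp only [Bool.and_false]
    · rw [pv_excl_12 x h]; rfl
  have e3 : (fun x => (!PySem.Str.startswith x "Access-Control-Request-Method:"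
      && !PySem.Str.startswith x "Access-Control-Request-Headers:"
      && PySem.Str.startswith x "Origin:"))
      = (fun x => PySem.Str.startswith x "Origin:") := by
    funext x
    cases h : PySem.Str.startswith x "Origin:"
    · simp only [Bool.and_false]
    · rw [pv_excl_13 x h, pv_excl_23 x h]; rfl
  simp only [pv_fold_lastmatch, Option.or_none, e2, e3]
  cases hr : data.reverse.find? (fun line => PySem.Str.startswith line "Access-Control-Request-Method:") with
  | none => simp [pvFalsy]
  | some r =>
    cases hh : data.reverse.find? (fun line => PySem.Str.startswith line "Access-Control-Request-Headers:") with
    | none => simp [pvFalsy]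
    | some hdr =>
      cases ho : data.reverse.find? (fun line => PySem.Str.startswith line "Origin:") with
      | none => simp [pvFalsy]
      | some o =>
        have hrp : PySem.Str.startswith r "Access-Control-Request-Method:" = true := by
          simpa using List.find?_some hr
        have hhp : PySem.Str.startswith hdr "Access-Control-Request-Headers:" = true := by
          simpa using List.find?_some hh
        have hop : PySem.Str.startswith o "Origin:" = true := by
          simpa using List.find?_some ho
        simp [pvFalsy, pv_match_ne_empty (by decide) hrp,
          pv_match_ne_empty (by decide) hhp, pv_match_ne_empty (by decide) hop]
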